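-- pv_equiv track=rewrite | github.com/micronoyau/Quantum-Computing-Lab | shor.py | partial_sum
-- ===== SOURCE A (Python) =====
-- def gcd (a, b):
--     while a%b != 0:
--         a, b = b, a%b
--     return b
--
-- def partial_sum (coefs):
--     """
--     [coefs] is of the form [a0, ..., an], and we compute 1/( a0 + 1/(a1 + ...) ) as p/q, gcd(p,q)=1
--     """
--     if len(coefs) == 1:
--         return (1,coefs[0])
--     p,q = partial_sum(coefs[1:])
--     den = coefs[0]*q + p
--     num = q
--     d = gcd(num,den)
--     return (int(num//d), int(den//d))
-- ===== SOURCE B (Python) =====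
-- def gcd (a, b):
--     while a%b != 0:
--         a, b = b, a%b
--     return b
--
-- def partial_sum (coefs):
--     """
--     [coefs] is of the form [a0, ..., an], and we compute 1/( a0 + 1/(a1 + ...) ) as p/q, gcd(p,q)=1
--     """
--     p, q = 1, coefs[-1]
--     for c in coefs[-2::-1]:
--         den = c*q + p
--         num = q
--         d = gcd(num, den)
--         p, q = int(num//d), int(den//d)
--     return (p, q)
-- ===== Notes on version B (the rewrite author's own statement) =====
-- stated objective: simpler
-- what changed: Replaces A's recursion with O(n^2) tail slicing by a single iterative backward pass over the coefficients that maintains (p,q) with the identical per-step gcd reduction.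
import Mathlib
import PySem

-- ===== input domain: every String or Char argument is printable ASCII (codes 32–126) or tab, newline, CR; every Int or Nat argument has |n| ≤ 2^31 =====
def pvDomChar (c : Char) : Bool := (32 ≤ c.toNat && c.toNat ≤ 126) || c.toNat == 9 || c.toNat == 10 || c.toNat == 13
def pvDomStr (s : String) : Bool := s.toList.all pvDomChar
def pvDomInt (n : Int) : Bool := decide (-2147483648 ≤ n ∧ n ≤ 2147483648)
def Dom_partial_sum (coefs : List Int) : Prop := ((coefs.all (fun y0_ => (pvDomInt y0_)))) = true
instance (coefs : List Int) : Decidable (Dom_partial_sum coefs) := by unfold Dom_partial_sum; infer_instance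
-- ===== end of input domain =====

-- B replaces A's recursion-with-slicing by a single backward iteration over the coefficients
-- with the identical per-step gcd reduction (objective: simpler decomposition, fewer list copies).

-- ===== PORT A =====

-- termination measure for the gcd loop (|a % b| < |b| for b ≠ 0)
theorem pyMod_natAbs_lt (a b : Int) (hb : b ≠ 0) :
    (PySem.Int.mod a b).natAbs < b.natAbs := by
  rcases lt_or_gt_of_ne hb with h | h
  · have h1 := PySem.Int.mod_neg_bounds a h
    omega
  · have h1 := PySem.Int.mod_nonneg a h
    have h2 := PySem.Int.mod_lt a h
    omega

-- Python 'gcd': while a%b != 0: a, b = b, a%b; return b.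
-- In Python, b = 0 raises ZeroDivisionError; such inputs are excluded by Pre_, here we return b.
def pyGcd (a b : Int) : Int :=
  if h : b ≠ 0 ∧ PySem.Int.mod a b ≠ 0 then pyGcd b (PySem.Int.mod a b) else b
termination_by b.natAbs
decreasing_by exact pyMod_natAbs_lt a b h.1

-- literal port of A; [] makes Python recurse forever (RecursionError), excluded by Pre_
def partial_sum : List Int → Int × Int
  | [] => (0, 0)
  | [a] => (1, a)
  | a :: b :: rest =>
    let pq := partial_sum (b :: rest)
    let den := a * pq.2 + pq.1
    let num := pq.2
    let d := pyGcd num den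
    (PySem.Int.floordiv num d, PySem.Int.floordiv den d)

-- ===== PORT B =====

-- literal port of Source B: coefs[-1] raises IndexError on [], excluded by Pre_;
-- coefs[-2::-1] is the reverse of the first (len-1) elements, i.e. coefs.dropLast.reverse.
def partial_sum_alt (coefs : List Int) : Int × Int :=
  match coefs.getLast? with
  | none => (0, 0)
  | some last =>
    coefs.dropLast.reverse.foldl
      (fun (pq : Int × Int) (c : Int) =>
        let den := c * pq.2 + pq.1
        let num := pq.2
        let d := pyGcd num den
        (PySem.Int.floordiv num d, PySem.Int.floordiv den d))
      (1, last)

-- ===== PRECONDITION & SPEC =====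

-- unreduced continuants of the tail (no gcd): standard characterisation of A's denominators
def contPQ : List Int → Int × Int
  | [] => (1, 1)
  | [a] => (1, a)
  | a :: b :: rest =>
    let pq := contPQ (b :: rest)
    (pq.2, a * pq.2 + pq.1)

-- no intermediate denominator a_i*q + p is zero (where Python's gcd would divide by zero)
def denOk : List Int → Bool
  | [] => true
  | [_] => true
  | a :: b :: rest => denOk (b :: rest) && (a * (contPQ (b :: rest)).2 + (contPQ (b :: rest)).1 != 0)

-- Pre_ excludes exactly the inputs where the Python A raises: the empty list (RecursionError)
-- and lists where some intermediate denominator is zero (ZeroDivisionError in gcd).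
def Pre_partial_sum (coefs : List Int) : Prop := coefs ≠ [] ∧ denOk coefs = true
instance (coefs : List Int) : Decidable (Pre_partial_sum coefs) := by unfold Pre_partial_sum; infer_instance

def pvWitness_partial_sum : List Int := [1, 2, 3]

def Spec_partial_sum (coefs : List Int) (out : Int × Int) : Prop := out = partial_sum_alt coefs
instance (coefs : List Int) (out : Int × Int) : Decidable (Spec_partial_sum coefs out) := by unfold Spec_partial_sum; infer_instance

-- ===== CLAIM (what is proved, stated in full; the proofs are below) =====
def Claim_equal_partial_sum : Prop := ∀ (coefs : List Int), Dom_partial_sum coefs → Pre_partial_sum coefs → Spec_partial_sum coefs (partial_sum coefs)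

-- ===== LEMMAS AND PROOFS =====

theorem partial_sum_concat (l : List Int) (a : Int) :
    partial_sum (l ++ [a]) =
      l.reverse.foldl
        (fun (pq : Int × Int) (c : Int) =>
          let den := c * pq.2 + pq.1
          let num := pq.2
          let d := pyGcd num den
          (PySem.Int.floordiv num d, PySem.Int.floordiv den d))
        (1, a) := by
  induction l with
  | nil => simp [partial_sum]
  | cons c l ih =>
    have hne : l ++ [a] ≠ [] := by simp
    obtain ⟨b, rest, hbr⟩ := List.exists_cons_of_ne_nil hne
    rw [List.cons_append, hbr, partial_sum, ← hbr, ih]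
    simp [List.foldl_append]

-- ===== VERDICT (by name: the statement is the Claim_ definition above) =====
theorem partial_sum_spec : Claim_equal_partial_sum := by
  intro coefs _ hpre
  unfold Spec_partial_sum
  rcases coefs.eq_nil_or_concat with rfl | ⟨l, a, rfl⟩
  · exact absurd rfl hpre.1
  · rw [List.concat_eq_append, partial_sum_concat]
    unfold partial_sum_alt
    simp
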